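-- pv_equiv track=rewrite | github.com/981377660LMT/algorithm-study | 6_tree/树的性质/树的欧拉路径/最小表示法-括号树-树的欧拉路径/minLexEulerTour.py | minLexEulerTourDep
-- ===== SOURCE A (Python) =====
-- from collections import deque
-- from typing import Deque, List
--
-- def minLexEulerTourDep(tree: List[List[int]]) -> List[int]:
--     """返回树的长为2*n-1的表示深度的欧拉序列,其中n为节点数."""
--
--     def dfs(cur: int, pre: int, dep: int) -> Deque[int]:
--         sub = sorted([dfs(next, cur, dep + 1) for next in tree[cur] if next != pre])
--         res = deque([dep])  # !进入
--         for d in sub: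
--             if len(res) > len(d):
--                 while d:
--                     res.append(d.popleft())
--             else:
--                 res, d = d, res
--                 while d:
--                     res.appendleft(d.pop())
--             res.append(dep)  # !回溯
--         return res
--
--     res = dfs(0, -1, 0)
--     return list(res)
-- ===== SOURCE B (Python) =====
-- def minLexEulerTourDep(tree):
--     """Same Euler-tour depth sequence, built by plain list concatenation (no small-to-large merge)."""
--     def dfs(cur, pre, dep):
--         subs = sorted(dfs(nxt, cur, dep + 1) for nxt in tree[cur] if nxt != pre)
--         return [dep] + [x for d in subs for x in d + [dep]]
--     return dfs(0, -1, 0)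
-- ===== Notes on version B (the rewrite author's own statement) =====
-- stated objective: simpler
-- what changed: dfs returns a plain list built as [dep] + concat(child + [dep] for sorted children), discarding A's deque small-to-large merge (the length comparison, swap, appendleft/popleft loops) entirely.
import Mathlib
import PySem

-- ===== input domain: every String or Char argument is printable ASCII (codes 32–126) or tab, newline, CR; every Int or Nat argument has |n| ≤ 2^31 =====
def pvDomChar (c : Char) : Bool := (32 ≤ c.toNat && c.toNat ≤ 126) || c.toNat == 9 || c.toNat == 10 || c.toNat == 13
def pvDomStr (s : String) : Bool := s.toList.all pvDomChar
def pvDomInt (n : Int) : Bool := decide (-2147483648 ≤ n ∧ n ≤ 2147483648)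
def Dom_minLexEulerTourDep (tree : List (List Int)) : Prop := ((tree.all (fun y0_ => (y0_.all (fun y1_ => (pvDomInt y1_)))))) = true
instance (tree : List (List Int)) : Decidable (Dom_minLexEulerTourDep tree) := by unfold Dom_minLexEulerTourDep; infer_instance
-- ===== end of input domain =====

-- B replaces A's deque small-to-large merge by plain list concatenation (objective: simpler).
-- Both ports are fuel-guarded transliterations (fuel only makes the recursion total; Pre_ guarantees it never runs out).

-- ===== PORT A =====
-- `while d: res.append(d.popleft())`
def pvMergeA (res d : List Int) : List Int :=
  match d with
  | [] => res
  | x :: xs => pvMergeA (res ++ [x]) xs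

-- after the swap `res, d = d, res`: `while d: res.appendleft(d.pop())`
def pvMergeFrontA (res d : List Int) : List Int :=
  if h : d = [] then res
  else pvMergeFrontA (d.getLast h :: res) d.dropLast
termination_by d.length
decreasing_by
  have : d.length ≠ 0 := fun h0 => h (List.eq_nil_of_length_eq_zero h0)
  simp [List.length_dropLast]; omega

def pvDfsA (tree : List (List Int)) : Nat → Int → Int → Int → List Int
  | 0, _, _, _ => []  -- fuel exhausted (never reached under Pre_)
  | fuel + 1, cur, pre, dep =>
    let sub := PySem.List.sorted
      ((((PySem.List.pyGet? tree cur).getD []).filter (fun nxt => nxt ≠ pre)).map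
        (fun nxt => pvDfsA tree fuel nxt cur (dep + 1))) (fun x => x) false
    sub.foldl (fun res d =>
      (if res.length > d.length then pvMergeA res d else pvMergeFrontA d res) ++ [dep]) [dep]

def pvFuel (tree : List (List Int)) : Nat := ((tree.map List.length).sum + 2) ^ 2

def minLexEulerTourDep (tree : List (List Int)) : List Int :=
  pvDfsA tree (pvFuel tree) 0 (-1) 0

-- ===== PORT B =====
def pvDfsB (tree : List (List Int)) : Nat → Int → Int → Int → List Int
  | 0, _, _, _ => []  -- fuel exhausted (never reached under Pre_)
  | fuel + 1, cur, pre, dep =>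
    let subs := PySem.List.sorted
      ((((PySem.List.pyGet? tree cur).getD []).filter (fun nxt => nxt ≠ pre)).map
        (fun nxt => pvDfsB tree fuel nxt cur (dep + 1))) (fun x => x) false
    dep :: subs.flatMap (fun d => d ++ [dep])

def minLexEulerTourDep_alt (tree : List (List Int)) : List Int :=
  pvDfsB tree (pvFuel tree) 0 (-1) 0

-- ===== PRECONDITION & SPEC =====
-- The DFS transition relation on states (cur, pre): from (cur, pre) the walk moves to (nxt, cur)
-- for each neighbour nxt ≠ pre of cur (Python indexing, so negative cur within range wraps).
def pvSuccs (tree : List (List Int)) (s : Int × Int) : List (Int × Int) :=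
  (((PySem.List.pyGet? tree s.1).getD []).filter (fun nxt => nxt ≠ s.2)).map (fun nxt => (nxt, s.1))

def pvStep (tree : List (List Int)) (ss : List (Int × Int)) : List (Int × Int) :=
  (ss ++ ss.flatMap (pvSuccs tree)).dedup

-- membership closure of pvStep (early exit at the fixpoint; inputs kept duplicate-free)
def pvClosure (tree : List (List Int)) : Nat → List (Int × Int) → List (Int × Int)
  | 0, ss => ss
  | k + 1, ss =>
    let ss' := pvStep tree ss
    if ss'.length = ss.length then ss else pvClosure tree k ss'

def pvStates (tree : List (List Int)) : List (Int × Int) :=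
  pvClosure tree (pvFuel tree) [(0, -1)]

-- Pre_: exactly the inputs on which Python's dfs returns normally — the walk relation from the
-- initial state (0, -1) only reaches in-range indices (no IndexError) and admits no cycle among
-- reachable states (no infinite recursion); it is a condition on the input graph, not a run of dfs.
def Pre_minLexEulerTourDep (tree : List (List Int)) : Prop :=
  tree ≠ [] ∧ ∀ s ∈ pvStates tree,
    (-(tree.length : Int) ≤ s.1 ∧ s.1 < (tree.length : Int) ∧
      s ∉ pvClosure tree (pvFuel tree) ((pvSuccs tree s).dedup))

instance (tree : List (List Int)) : Decidable (Pre_minLexEulerTourDep tree) := by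
  unfold Pre_minLexEulerTourDep; infer_instance

def pvWitness_minLexEulerTourDep : List (List Int) := [[1, 2], [0], [0]]

def Spec_minLexEulerTourDep (tree : List (List Int)) (out : List Int) : Prop := out = minLexEulerTourDep_alt tree
instance (tree : List (List Int)) (out : List Int) : Decidable (Spec_minLexEulerTourDep tree out) := by unfold Spec_minLexEulerTourDep; infer_instance

-- ===== CLAIM (what is proved, stated in full; the proofs are below) =====
def Claim_equal_minLexEulerTourDep : Prop := ∀ (tree : List (List Int)), Dom_minLexEulerTourDep tree → Pre_minLexEulerTourDep tree → Spec_minLexEulerTourDep tree (minLexEulerTourDep tree)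

-- ===== LEMMAS AND PROOFS =====

theorem pvMergeA_eq_append : ∀ (d res : List Int), pvMergeA res d = res ++ d := by
  intro d
  induction d with
  | nil => intro res; simp [pvMergeA]
  | cons x xs ih => intro res; simp [pvMergeA, ih]

theorem pvMergeFrontA_eq_append : ∀ (d res : List Int), pvMergeFrontA res d = d ++ res := by
  intro d
  induction d using List.reverseRecOn with
  | nil => intro res; simp [pvMergeFrontA]
  | append_singleton ys x ih =>
    intro res
    rw [pvMergeFrontA]
    simp [ih]

theorem pvDfs_eq (tree : List (List Int)) :
    ∀ (fuel : Nat) (cur pre dep : Int),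
      pvDfsA tree fuel cur pre dep = pvDfsB tree fuel cur pre dep := by
  intro fuel
  induction fuel with
  | zero => intro cur pre dep; rfl
  | succ fuel ih =>
    intro cur pre dep
    have hmap : (fun nxt => pvDfsA tree fuel nxt cur (dep + 1))
        = (fun nxt => pvDfsB tree fuel nxt cur (dep + 1)) := funext fun nxt => ih nxt cur (dep + 1)
    show (PySem.List.sorted _ _ _).foldl _ _ = _
    rw [pvDfsB, hmap]
    generalize PySem.List.sorted
      ((((PySem.List.pyGet? tree cur).getD []).filter (fun nxt => nxt ≠ pre)).map
        (fun nxt => pvDfsB tree fuel nxt cur (dep + 1))) (fun x => x) false = sub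
    have hstep : ∀ (init : List Int),
        sub.foldl (fun res d =>
          (if res.length > d.length then pvMergeA res d else pvMergeFrontA d res) ++ [dep]) init
          = init ++ sub.flatMap (fun d => d ++ [dep]) := by
      induction sub with
      | nil => intro init; simp
      | cons d ds ihs =>
        intro init
        simp only [List.foldl_cons, List.flatMap_cons]
        rw [ihs]
        by_cases h : init.length > d.length
        · simp [h, pvMergeA_eq_append]
        · simp [h, pvMergeFrontA_eq_append]
    simpa using hstep [dep]

-- ===== VERDICT (by name: the statement is the Claim_ definition above) =====
theorem minLexEulerTourDep_spec : Claim_equal_minLexEulerTourDep := by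
  intro tree _ _
  show minLexEulerTourDep tree = minLexEulerTourDep_alt tree
  exact pvDfs_eq tree (pvFuel tree) 0 (-1) 0
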